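-- pv_equiv track=rewrite | github.com/rahul-mitra13/GarmentCodeToObj | garmentJsonToObj.py | has_duplicate_faces
-- ===== SOURCE A (Python) =====
-- def has_duplicate_faces(faces):
--     """
--     Check for duplicate faces in a list of faces.
--
--     Parameters:
--     faces (list of list or tuple): List of faces, where each face is a list or tuple of vertex indices.
--
--     Returns:
--     bool: True if there are duplicate faces, False otherwise.
--     """
--     seen = set()
--     for face in faces:
--         # Sort the vertex indices to handle different permutations of the same face
--         sorted_face = tuple(sorted(face))
--         if sorted_face in seen:
--             return True
--         seen.add(sorted_face)
--     return False
-- ===== SOURCE B (Python) =====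
-- def has_duplicate_faces(faces):
--     norm = sorted(tuple(sorted(face)) for face in faces)
--     return any(a == b for a, b in zip(norm, norm[1:]))
-- ===== Notes on version B (the rewrite author's own statement) =====
-- stated objective: alternative
-- what changed: Replaces the incremental hash-set membership scan by a sort-then-adjacent-scan: all normalized faces are sorted lexicographically and duplicates are detected as equal adjacent pairs, with no set at all.
import Mathlib
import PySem

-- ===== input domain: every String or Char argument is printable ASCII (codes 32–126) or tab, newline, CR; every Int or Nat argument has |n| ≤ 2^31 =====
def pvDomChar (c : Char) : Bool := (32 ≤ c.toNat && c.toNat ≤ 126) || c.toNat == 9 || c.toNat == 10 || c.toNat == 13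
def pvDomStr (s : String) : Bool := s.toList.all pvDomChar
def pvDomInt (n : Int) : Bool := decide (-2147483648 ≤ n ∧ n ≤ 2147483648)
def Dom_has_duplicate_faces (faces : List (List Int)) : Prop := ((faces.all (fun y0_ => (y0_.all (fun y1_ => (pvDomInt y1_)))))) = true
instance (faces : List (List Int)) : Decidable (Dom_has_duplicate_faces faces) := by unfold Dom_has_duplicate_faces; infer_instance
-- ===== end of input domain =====

-- B replaces the incremental hash-set scan by sort-then-adjacent-scan: sort the normalized faces and look for an equal adjacent pair (alternative decomposition, no set).

-- ===== PORT A =====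
-- the 'for face in faces' loop with the growing 'seen' set and the early 'return True'
def hdfLoop (seen : PySem.Set (List Int)) : List (List Int) → Bool
  | [] => false
  | face :: rest =>
    let sorted_face := PySem.List.sorted face (fun x => x) false
    if PySem.Set.contains seen sorted_face then true
    else hdfLoop (PySem.Set.add seen sorted_face) rest

def has_duplicate_faces (faces : List (List Int)) : Bool :=
  hdfLoop PySem.Set.empty faces

-- ===== PORT B =====
def has_duplicate_faces_alt (faces : List (List Int)) : Bool :=
  let norm := PySem.List.sorted (faces.map (fun face => PySem.List.sorted face (fun x => x) false)) (fun x => x) false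
  (norm.zip norm.tail).any (fun p => p.1 == p.2)

-- ===== PRECONDITION & SPEC =====
def Spec_has_duplicate_faces (faces : List (List Int)) (out : Bool) : Prop := out = has_duplicate_faces_alt faces
instance (faces : List (List Int)) (out : Bool) : Decidable (Spec_has_duplicate_faces faces out) := by unfold Spec_has_duplicate_faces; infer_instance

-- ===== CLAIM (what is proved, stated in full; the proofs are below) =====
def Claim_equal_has_duplicate_faces : Prop := ∀ (faces : List (List Int)), Dom_has_duplicate_faces faces → Spec_has_duplicate_faces faces (has_duplicate_faces faces)

-- ===== LEMMAS AND PROOFS =====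

-- A's loop returns false iff the normalized faces are pairwise distinct and disjoint from 'seen'
lemma hdfLoop_false_iff (l : List (List Int)) (s : PySem.Set (List Int)) :
    hdfLoop s l = false ↔
      (l.map (fun face => PySem.List.sorted face (fun x => x) false)).Nodup ∧
      ∀ x ∈ l.map (fun face => PySem.List.sorted face (fun x => x) false), x ∉ s := by
  induction l generalizing s with
  | nil => simp [hdfLoop]
  | cons f rest ih =>
    simp only [hdfLoop, List.map_cons, List.nodup_cons, List.mem_cons]
    by_cases hmem : (PySem.List.sorted f (fun x => x) false) ∈ s
    · have hc : PySem.Set.contains s (PySem.List.sorted f (fun x => x) false) = true :=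
        (PySem.Set.contains_iff _ _).mpr hmem
      simp only [hc, if_true, Bool.true_eq_false, false_iff]
      rintro ⟨_, h⟩
      exact absurd hmem (h _ (Or.inl rfl))
    · have : PySem.Set.contains s (PySem.List.sorted f (fun x => x) false) = false := by
        simp [hmem]
      simp only [this]
      rw [if_neg (by simp)]
      rw [ih]
      constructor
      · rintro ⟨hnd, hall⟩
        have hnotin : (PySem.List.sorted f (fun x => x) false) ∉
            rest.map (fun face => PySem.List.sorted face (fun x => x) false) := by
          intro hx
          have := hall _ hx
          rw [PySem.Set.mem_add] at this
          exact this (Or.inr rfl)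
        refine ⟨⟨hnotin, hnd⟩, ?_⟩
        rintro x (rfl | hx)
        · exact hmem
        · intro hxs
          exact (hall x hx) ((PySem.Set.mem_add _ _ _).mpr (Or.inl hxs))
      · rintro ⟨⟨hnotin, hnd⟩, hall⟩
        refine ⟨hnd, ?_⟩
        intro x hx hxadd
        rcases (PySem.Set.mem_add _ _ _).mp hxadd with hxs | rfl
        · exact hall x (Or.inr hx) hxs
        · exact hnotin hx

-- the identity-key sort of the normalized faces is ≤-sorted (bridges the core List.instLT
-- instance the port elaborates with to the LinearOrder instance of PySem.List.sorted_pairwise)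
lemma sorted_id_pairwise_le (m : List (List Int)) :
    (PySem.List.sorted m (fun x => x) false).Pairwise (· ≤ ·) := by
  have h : (fun (a b : List Int) => a.decidableLT b)
      = (fun (a b : List Int) => LinearOrder.toDecidableLT a b) := by
    funext a b; exact Subsingleton.elim _ _
  rw [show (@PySem.List.sorted (List ℤ) (List ℤ) List.instLT (fun a b => a.decidableLT b) m (fun x => x) false)
      = (@PySem.List.sorted (List ℤ) (List ℤ) List.instLinearOrder.toLT LinearOrder.toDecidableLT m (fun x => x) false) by rw [h]]
  exact PySem.List.sorted_pairwise m (fun x => x)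

-- in a ≤-sorted list, an equal adjacent pair exists iff the list has a duplicate
lemma adj_any_eq_not_nodup {α : Type} [BEq α] [LawfulBEq α] [LinearOrder α]
    (l : List α) (hp : l.Pairwise (· ≤ ·)) :
    ((l.zip l.tail).any (fun p => p.1 == p.2)) = !decide l.Nodup := by
  induction l with
  | nil => simp
  | cons a t ih =>
    cases t with
    | nil => simp
    | cons b t' =>
      have hp' : (b :: t').Pairwise (· ≤ ·) := hp.tail
      have hab : a ≤ b := (List.pairwise_cons.mp hp).1 b (List.mem_cons_self)
      have hrec := ih hp'
      by_cases hEq : a = b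
      · subst hEq
        simp [List.nodup_cons]
      · have hna : a ∉ b :: t' := by
          intro hmem
          rcases List.mem_cons.mp hmem with rfl | hmem'
          · exact hEq rfl
          · have hbx : b ≤ a := List.rel_of_pairwise_cons hp' hmem'
            exact hEq (le_antisymm hab hbx)
        have hnds : (a :: b :: t').Nodup ↔ (b :: t').Nodup := by
          simp [List.nodup_cons, hna]
        have he : (a == b) = false := beq_eq_false_iff_ne.mpr hEq
        simp only [List.tail_cons] at hrec
        simp only [List.tail_cons, List.zip_cons_cons, List.any_cons, he, Bool.false_or]
        rw [hrec]
        by_cases h2 : (b :: t').Nodup <;> simp [h2, hnds]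

-- ===== VERDICT (by name: the statement is the Claim_ definition above) =====
theorem has_duplicate_faces_spec : Claim_equal_has_duplicate_faces := by
  intro faces _
  unfold Spec_has_duplicate_faces has_duplicate_faces has_duplicate_faces_alt
  dsimp only
  set m := faces.map (fun face => PySem.List.sorted face (fun x => x) false) with hm
  set norm := PySem.List.sorted m (fun x => x) false with hnorm
  have hperm : norm.Perm m := PySem.List.sorted_perm m (fun x => x) false
  have hpair : norm.Pairwise (· ≤ ·) := by
    rw [hnorm]; exact sorted_id_pairwise_le m
  have hB := adj_any_eq_not_nodup norm hpair
  have hA := hdfLoop_false_iff faces PySem.Set.empty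
  have hndeq : norm.Nodup ↔ m.Nodup := hperm.nodup_iff
  have hempty : ∀ x : List Int, x ∉ (PySem.Set.empty : PySem.Set (List Int)) := by
    intro x hx; simp [PySem.Set.empty] at hx
  by_cases hnd : m.Nodup
  · have h1 : hdfLoop PySem.Set.empty faces = false := hA.mpr ⟨hnd, fun x _ => hempty x⟩
    rw [h1, hB]
    simp [hndeq.mpr hnd]
  · have h1 : hdfLoop PySem.Set.empty faces = true := by
      cases h : hdfLoop PySem.Set.empty faces
      · exact absurd (hA.mp h).1 hnd
      · rfl
    rw [h1, hB]
    simp [hndeq, hnd]
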